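-- pv_equiv track=rewrite | github.com/Lokeshvastrad/Python_Random | Python/Python/maxPriceKeyBoard.py | maxPriceKeyBoard
-- ===== SOURCE A (Python) =====
-- def maxPriceKeyBoard(a,b,w):
--     n=len(a)
--     m=len(b)
--     maxSpend=-1
--     l=[]
--     for i in range(n):
--         for j in range(m):
--             l.append(a[i]+b[j])
--
--     sum_list=sorted(l,reverse=True)
--     for i in sum_list:
--         if i <= w:
--             return i
--     return -1
-- ===== SOURCE B (Python) =====
-- def maxPriceKeyBoard(a, b, w):
--     best = None
--     for x in a:
--         for y in b:
--             s = x + y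
--             if s <= w and (best is None or s > best):
--                 best = s
--     return -1 if best is None else best
-- ===== Notes on version B (the rewrite author's own statement) =====
-- stated objective: faster
-- what changed: Instead of materializing all n*m pairwise sums, sorting them descending and scanning for the first sum <= w, B keeps a running Option best in a single streaming pass over the pairs and never builds a list or sorts.
import Mathlib
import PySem

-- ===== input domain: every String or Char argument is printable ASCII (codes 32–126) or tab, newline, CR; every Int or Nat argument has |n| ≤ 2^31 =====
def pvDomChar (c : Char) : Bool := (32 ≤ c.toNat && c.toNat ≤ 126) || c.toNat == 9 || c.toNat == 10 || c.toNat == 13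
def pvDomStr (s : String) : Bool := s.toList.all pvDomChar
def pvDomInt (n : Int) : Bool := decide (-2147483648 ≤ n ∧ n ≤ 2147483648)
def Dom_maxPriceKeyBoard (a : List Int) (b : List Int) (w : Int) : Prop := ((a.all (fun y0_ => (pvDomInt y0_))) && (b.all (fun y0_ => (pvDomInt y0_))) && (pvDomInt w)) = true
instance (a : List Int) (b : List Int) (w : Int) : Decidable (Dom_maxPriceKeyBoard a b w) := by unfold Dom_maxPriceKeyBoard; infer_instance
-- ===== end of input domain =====

-- B replaces A's build-all-sums / sort-descending / scan with one streaming pass keeping a running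
-- Option best (no list, no sort); same return value, measured and asymptotically faster.

-- ===== PORT A =====
-- helper for A's 'for i in sum_list: if i <= w: return i' followed by 'return -1'
def pvFirstLE (w : Int) : List Int → Int
  | [] => -1
  | x :: xs => if x ≤ w then x else pvFirstLE w xs

def maxPriceKeyBoard (a : List Int) (b : List Int) (w : Int) : Int :=
  let n : Int := a.length
  let m : Int := b.length
  let l : List Int := (PySem.List.pyRange 0 n 1).foldl (fun acc i =>
    (PySem.List.pyRange 0 m 1).foldl (fun acc2 j =>
      acc2 ++ [PySem.List.pyGetD a i 0 + PySem.List.pyGetD b j 0]) acc) []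
  let sum_list := PySem.List.sorted l (fun x => x) true
  pvFirstLE w sum_list

-- ===== PORT B =====
def maxPriceKeyBoard_alt (a : List Int) (b : List Int) (w : Int) : Int :=
  let best := a.foldl (fun best x =>
    b.foldl (fun best y =>
      let s := x + y
      match best with
      | none => if s ≤ w then some s else none
      | some m => if s ≤ w ∧ m < s then some s else best) best) (none : Option Int)
  match best with
  | none => -1
  | some m => m

-- ===== PRECONDITION & SPEC =====
def Spec_maxPriceKeyBoard (a : List Int) (b : List Int) (w : Int) (out : Int) : Prop := out = maxPriceKeyBoard_alt a b w
instance (a : List Int) (b : List Int) (w : Int) (out : Int) : Decidable (Spec_maxPriceKeyBoard a b w out) := by unfold Spec_maxPriceKeyBoard; infer_instance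

-- ===== CLAIM (what is proved, stated in full; the proofs are below) =====
def Claim_equal_maxPriceKeyBoard : Prop := ∀ (a : List Int) (b : List Int) (w : Int), Dom_maxPriceKeyBoard a b w → Spec_maxPriceKeyBoard a b w (maxPriceKeyBoard a b w)

-- ===== LEMMAS AND PROOFS =====

-- "R is the answer for sums L": either no sum ≤ w and R = -1, or R is the largest sum ≤ w.
def pvAnswer (w : Int) (L : List Int) (R : Int) : Prop :=
  (R = -1 ∧ ∀ s ∈ L, ¬ s ≤ w) ∨ (R ∈ L ∧ R ≤ w ∧ ∀ s ∈ L, s ≤ w → s ≤ R)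

theorem pvAnswer_unique (w : Int) (L : List Int) (R1 R2 : Int)
    (h1 : pvAnswer w L R1) (h2 : pvAnswer w L R2) : R1 = R2 := by
  rcases h1 with ⟨e1, n1⟩ | ⟨m1, le1, mx1⟩ <;> rcases h2 with ⟨e2, n2⟩ | ⟨m2, le2, mx2⟩
  · omega
  · exact absurd le2 (n1 _ m2)
  · exact absurd le1 (n2 _ m1)
  · exact le_antisymm (mx2 _ m1 le1) (mx1 _ m2 le2)

theorem pvAnswer_perm (w : Int) (L L' : List Int) (hp : L.Perm L') (R : Int)
    (h : pvAnswer w L R) : pvAnswer w L' R := by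
  rcases h with ⟨e, n⟩ | ⟨m, le, mx⟩
  · exact Or.inl ⟨e, fun s hs => n s (hp.mem_iff.mpr hs)⟩
  · exact Or.inr ⟨hp.mem_iff.mp m, le, fun s hs => mx s (hp.mem_iff.mpr hs)⟩

-- A's scan of a descending-sorted list yields the answer.
theorem firstLE_answer (w : Int) (S : List Int) (h : S.Pairwise (fun a b => b ≤ a)) :
    pvAnswer w S (pvFirstLE w S) := by
  induction S with
  | nil => exact Or.inl ⟨rfl, by simp⟩
  | cons x xs ih =>
    rw [List.pairwise_cons] at h
    by_cases hx : x ≤ w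
    · refine Or.inr ⟨by simp [pvFirstLE, hx], by simp [pvFirstLE, hx], ?_⟩
      intro s hs _
      simp only [pvFirstLE, if_pos hx]
      rcases List.mem_cons.mp hs with hs | hs
      · omega
      · exact h.1 s hs
    · have hrec := ih h.2
      have hstep : pvFirstLE w (x :: xs) = pvFirstLE w xs := by simp [pvFirstLE, hx]
      rcases hrec with ⟨e, n⟩ | ⟨m, le, mx⟩
      · refine Or.inl ⟨by rw [hstep]; exact e, ?_⟩
        intro s hs
        rcases List.mem_cons.mp hs with hs | hs
        · omega
        · exact n s hs
      · refine Or.inr ⟨by rw [hstep]; exact List.mem_cons_of_mem _ m, by rw [hstep]; exact le, ?_⟩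
        intro s hs hsw
        rw [hstep]
        rcases List.mem_cons.mp hs with hs | hs
        · omega
        · exact mx s hs hsw

-- B's fold step
def pvStep (w : Int) (best : Option Int) (s : Int) : Option Int :=
  match best with
  | none => if s ≤ w then some s else none
  | some m => if s ≤ w ∧ m < s then some s else best

theorem pvStep_none (w : Int) (o : Option Int) (s : Int) (h : pvStep w o s = none) :
    o = none ∧ ¬ s ≤ w := by
  cases o <;> simp only [pvStep] at h <;> split at h <;> simp_all

theorem pvStep_some (w : Int) (o : Option Int) (s m : Int) (h : pvStep w o s = some m) :
    (m = s ∧ s ≤ w) ∨ o = some m := by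
  cases o <;> simp only [pvStep] at h <;> split at h <;> simp_all

theorem pvStep_ge (w : Int) (o : Option Int) (s m : Int) (h : pvStep w o s = some m)
    (hsw : s ≤ w) : s ≤ m := by
  cases o <;> simp only [pvStep] at h <;> split at h <;> simp_all

theorem pvStep_mono (w : Int) (o : Option Int) (s k m : Int) (ho : o = some k)
    (h : pvStep w o s = some m) : k ≤ m := by
  subst ho; simp only [pvStep] at h; split at h <;> simp_all; omega

theorem pvStep_isSome (w : Int) (k s : Int) : ∃ m, pvStep w (some k) s = some m := by
  simp only [pvStep]; split <;> exact ⟨_, rfl⟩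

theorem foldl_step_spec (w : Int) (L : List Int) (o : Option Int) :
    match L.foldl (pvStep w) o with
    | none => o = none ∧ ∀ s ∈ L, ¬ s ≤ w
    | some m => ((m ∈ L ∧ m ≤ w) ∨ o = some m) ∧ (∀ s ∈ L, s ≤ w → s ≤ m) ∧
        (∀ k, o = some k → k ≤ m) := by
  induction L generalizing o with
  | nil =>
    cases o with
    | none => simp
    | some m => simp
  | cons s L ih =>
    have h := ih (pvStep w o s)
    rw [List.foldl_cons]
    cases hf : (L.foldl (pvStep w) (pvStep w o s)) with
    | none =>
      rw [hf] at h
      obtain ⟨h1, h2⟩ := h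
      obtain ⟨ho, hsw⟩ := pvStep_none w o s h1
      refine ⟨ho, ?_⟩
      intro t ht
      rcases List.mem_cons.mp ht with ht | ht
      · subst ht; exact hsw
      · exact h2 t ht
    | some m =>
      rw [hf] at h
      obtain ⟨h1, h2, h3⟩ := h
      refine ⟨?_, ?_, ?_⟩
      · rcases h1 with ⟨hm, hw⟩ | he
        · exact Or.inl ⟨List.mem_cons_of_mem _ hm, hw⟩
        · rcases pvStep_some w o s m he with ⟨hms, hsw⟩ | ho
          · exact Or.inl ⟨by rw [hms]; exact List.mem_cons_self .., by omega⟩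
          · exact Or.inr ho
      · intro t ht htw
        rcases List.mem_cons.mp ht with ht | ht
        · subst ht
          rcases hs : pvStep w o t with _ | k
          · exact absurd (pvStep_none w o t hs).2 (by omega)
          · exact le_trans (pvStep_ge w o t k hs htw) (h3 k hs)
        · exact h2 t ht htw
      · intro k hk
        subst hk
        obtain ⟨j, hj⟩ := pvStep_isSome w k s
        exact le_trans (pvStep_mono w (some k) s k j rfl hj) (h3 j hj)

theorem alt_answer (a b : List Int) (w : Int) :
    pvAnswer w (a.flatMap (fun x => b.map (fun y => x + y))) (maxPriceKeyBoard_alt a b w) := by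
  have hfold : (a.foldl (fun best x =>
      b.foldl (fun best y =>
        let s := x + y
        match best with
        | none => if s ≤ w then some s else none
        | some m => if s ≤ w ∧ m < s then some s else best) best) (none : Option Int))
      = (a.flatMap (fun x => b.map (fun y => x + y))).foldl (pvStep w) none := by
    rw [List.foldl_flatMap]
    congr 1
    funext acc x
    rw [List.foldl_map]
    rfl
  have h := foldl_step_spec w (a.flatMap (fun x => b.map (fun y => x + y))) none
  unfold maxPriceKeyBoard_alt
  rw [hfold]
  cases hf : (a.flatMap (fun x => b.map (fun y => x + y))).foldl (pvStep w) none with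
  | none =>
    rw [hf] at h
    exact Or.inl ⟨rfl, h.2⟩
  | some m =>
    rw [hf] at h
    obtain ⟨h1, h2, _⟩ := h
    rcases h1 with ⟨hm, hw⟩ | he
    · exact Or.inr ⟨hm, hw, h2⟩
    · simp at he

-- A's list l is the flatMap of pairwise sums.
theorem listA_eq (a b : List Int) :
    ((PySem.List.pyRange 0 (a.length : Int) 1).foldl (fun acc i =>
      (PySem.List.pyRange 0 (b.length : Int) 1).foldl (fun acc2 j =>
        acc2 ++ [PySem.List.pyGetD a i 0 + PySem.List.pyGetD b j 0]) acc) [])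
    = a.flatMap (fun x => b.map (fun y => x + y)) := by
  have hinner : ∀ (x : Int) (acc : List Int),
      (PySem.List.pyRange 0 (b.length : Int) 1).foldl (fun acc2 j =>
        acc2 ++ [x + PySem.List.pyGetD b j 0]) acc = acc ++ b.map (fun y => x + y) := by
    intro x acc
    rw [PySem.List.foldl_pyRange_zero_pyGetD' b 0 (fun acc2 y => acc2 ++ [x + y]) acc]
    rw [PySem.List.foldl_append_singleton_eq_map]
  calc ((PySem.List.pyRange 0 (a.length : Int) 1).foldl (fun acc i =>
      (PySem.List.pyRange 0 (b.length : Int) 1).foldl (fun acc2 j =>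
        acc2 ++ [PySem.List.pyGetD a i 0 + PySem.List.pyGetD b j 0]) acc) [])
      = (PySem.List.pyRange 0 (a.length : Int) 1).foldl (fun acc i =>
          acc ++ b.map (fun y => PySem.List.pyGetD a i 0 + y)) [] := by
        apply PySem.List.foldl_congr_mem
        intro acc i _
        exact hinner _ acc
    _ = a.foldl (fun acc x => acc ++ b.map (fun y => x + y)) [] := by
        exact PySem.List.foldl_pyRange_zero_pyGetD' a 0 (fun acc x => acc ++ b.map (fun y => x + y)) []
    _ = a.flatMap (fun x => b.map (fun y => x + y)) := by
        rw [PySem.List.foldl_append_eq_flatMap]; simp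

-- ===== VERDICT (by name: the statement is the Claim_ definition above) =====
theorem maxPriceKeyBoard_spec : Claim_equal_maxPriceKeyBoard := by
  intro a b w _
  unfold Spec_maxPriceKeyBoard
  set L := a.flatMap (fun x => b.map (fun y => x + y)) with hL
  have hA : maxPriceKeyBoard a b w = pvFirstLE w (PySem.List.sorted L (fun x => x) true) := by
    show pvFirstLE w (PySem.List.sorted ((PySem.List.pyRange 0 (a.length : Int) 1).foldl (fun acc i =>
      (PySem.List.pyRange 0 (b.length : Int) 1).foldl (fun acc2 j =>
        acc2 ++ [PySem.List.pyGetD a i 0 + PySem.List.pyGetD b j 0]) acc) []) (fun x => x) true) = _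
    rw [listA_eq]
  have hperm : (PySem.List.sorted L (fun x => x) true).Perm L := PySem.List.sorted_perm L _ _
  have hpw : (PySem.List.sorted L (fun x => x) true).Pairwise (fun a b => b ≤ a) :=
    PySem.List.sorted_pairwise_rev L (fun x => x)
  have hAans : pvAnswer w L (maxPriceKeyBoard a b w) := by
    rw [hA]
    exact pvAnswer_perm w _ L hperm _ (firstLE_answer w _ hpw)
  have hBans : pvAnswer w L (maxPriceKeyBoard_alt a b w) := alt_answer a b w
  exact pvAnswer_unique w L _ _ hAans hBans
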